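-- pv_equiv track=rewrite | github.com/vickydecodes/quantum-route-optimizer | backend/app/algorithms/quantum.py | bitstring_to_route
-- ===== SOURCE A (Python) =====
-- def bitstring_to_route(bitstring: str, n: int) -> list:
--     ones  = [i for i, b in enumerate(reversed(bitstring)) if b == "1"]
--     zeros = [i for i, b in enumerate(reversed(bitstring)) if b == "0"]
--     seen, deduped = set(), []
--     for node in ones + zeros:
--         if node < n and node not in seen:
--             deduped.append(node)
--             seen.add(node)
--     for node in range(n):
--         if node not in seen:
--             deduped.append(node)
--     return deduped
-- ===== SOURCE B (Python) =====
-- def bitstring_to_route(bitstring: str, n: int) -> list: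
--     rev = bitstring[::-1]
--
--     def priority(i):
--         if i < len(rev):
--             if rev[i] == "1":
--                 return 0
--             if rev[i] == "0":
--                 return 1
--         return 2
--
--     return sorted(range(n), key=priority)
-- ===== Notes on version B (the rewrite author's own statement) =====
-- stated objective: idiomatic
-- what changed: Replaces A's two filtered enumerate-passes plus seen-set dedup loop plus fill loop with a single stable sort of range(n) by a 3-valued bit priority (1-bits, then 0-bits, then missing positions); measured constant-factor speedup from dropping the per-node set bookkeeping.
import Mathlib
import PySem

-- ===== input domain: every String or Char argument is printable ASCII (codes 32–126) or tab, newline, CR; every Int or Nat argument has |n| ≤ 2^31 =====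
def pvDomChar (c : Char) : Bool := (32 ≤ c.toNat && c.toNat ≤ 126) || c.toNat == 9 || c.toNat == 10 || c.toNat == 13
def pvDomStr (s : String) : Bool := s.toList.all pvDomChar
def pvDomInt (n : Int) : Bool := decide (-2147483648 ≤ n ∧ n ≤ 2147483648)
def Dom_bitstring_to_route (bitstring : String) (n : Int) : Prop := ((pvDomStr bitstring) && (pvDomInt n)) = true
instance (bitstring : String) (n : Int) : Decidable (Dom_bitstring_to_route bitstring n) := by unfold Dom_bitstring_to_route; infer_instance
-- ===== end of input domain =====

-- B replaces A's two filtered enumerate passes + seen-set dedup loop + fill loop by one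
-- stable sort of range(n) under a 3-valued bit priority (idiomatic; measured faster in a timing run).

-- ===== PORT A =====
def bitstring_to_route (bitstring : String) (n : Int) : List Int :=
  let rcs := bitstring.toList.reverse
  let ones := ((PySem.List.enumerate rcs).filter (fun p => p.2 == '1')).map (·.1)
  let zeros := ((PySem.List.enumerate rcs).filter (fun p => p.2 == '0')).map (·.1)
  let sd := (ones ++ zeros).foldl
    (fun (sd : PySem.Set Int × List Int) node =>
      if node < n ∧ PySem.Set.contains sd.1 node = false then
        (PySem.Set.add sd.1 node, sd.2 ++ [node])
      else sd)
    (PySem.Set.empty, [])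
  (PySem.List.pyRange 0 n 1).foldl
    (fun acc node => if PySem.Set.contains sd.1 node = false then acc ++ [node] else acc)
    sd.2

-- ===== PORT B =====
-- B's priority: 0 for a '1' bit, 1 for a '0' bit, 2 otherwise (other char or i ≥ len(rev)).
-- i comes from range(n) so it is nonnegative; pyGet? ports rev[i] (exact there).
def pvPriority (rcs : List Char) (i : Int) : Int :=
  if i < (rcs.length : Int) then
    if PySem.List.pyGet? rcs i = some '1' then 0
    else if PySem.List.pyGet? rcs i = some '0' then 1
    else 2
  else 2

def bitstring_to_route_alt (bitstring : String) (n : Int) : List Int :=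
  let rcs := bitstring.toList.reverse
  PySem.List.sorted (PySem.List.pyRange 0 n 1) (pvPriority rcs)

-- ===== PRECONDITION & SPEC =====
def Spec_bitstring_to_route (bitstring : String) (n : Int) (out : List Int) : Prop := out = bitstring_to_route_alt bitstring n
instance (bitstring : String) (n : Int) (out : List Int) : Decidable (Spec_bitstring_to_route bitstring n out) := by unfold Spec_bitstring_to_route; infer_instance

-- ===== CLAIM (what is proved, stated in full; the proofs are below) =====
def Claim_equal_bitstring_to_route : Prop := ∀ (bitstring : String) (n : Int), Dom_bitstring_to_route bitstring n → Spec_bitstring_to_route bitstring n (bitstring_to_route bitstring n)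

-- ===== LEMMAS AND PROOFS =====

-- insertBy with a key: x lands between a prefix of keys ≤ key x and a suffix of keys > key x.
theorem pv_insertBy_middle {α : Type} (key : α → Int) (x : α) (A B : List α)
    (hA : ∀ y ∈ A, ¬ key x < key y) (hB : ∀ y ∈ B, key x < key y) :
    PySem.List.insertBy (fun a b => decide (key a < key b)) x (A ++ B) = A ++ x :: B := by
  induction A with
  | nil =>
    cases B with
    | nil => rfl
    | cons b bs => simp [PySem.List.insertBy, hB b (by simp)]
  | cons a as ih =>
    have hax : ¬ key x < key a := hA a (by simp)
    simp only [List.cons_append, PySem.List.insertBy, decide_eq_true_eq, if_neg hax]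
    rw [ih (fun y hy => hA y (by simp [hy]))]

-- Stability of PySem's sort for a key with values in {0,1,2}: buckets keep input order.
theorem pv_sorted3 {α : Type} (key : α → Int) (xs : List α)
    (h : ∀ x ∈ xs, key x = 0 ∨ key x = 1 ∨ key x = 2) :
    PySem.List.sorted xs key =
      xs.filter (fun x => key x == 0) ++ xs.filter (fun x => key x == 1) ++
        xs.filter (fun x => key x == 2) := by
  induction xs using List.reverseRecOn with
  | nil => rfl
  | append_singleton ys x ih =>
    have hys : ∀ y ∈ ys, key y = 0 ∨ key y = 1 ∨ key y = 2 :=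
      fun y hy => h y (by simp [hy])
    have hx : key x = 0 ∨ key x = 1 ∨ key x = 2 := h x (by simp)
    have hstep : PySem.List.sorted (ys ++ [x]) key =
        PySem.List.insertBy (fun a b => decide (key a < key b)) x (PySem.List.sorted ys key) := by
      rw [PySem.List.sorted_eq_foldl_insertBy, PySem.List.sorted_eq_foldl_insertBy,
        List.foldl_append]
      rfl
    rw [hstep, ih hys]
    have m0 : ∀ y ∈ ys.filter (fun z => key z == 0), key y = 0 := by
      intro y hy; simpa using (List.of_mem_filter hy)
    have m1 : ∀ y ∈ ys.filter (fun z => key z == 1), key y = 1 := by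
      intro y hy; simpa using (List.of_mem_filter hy)
    have m2 : ∀ y ∈ ys.filter (fun z => key z == 2), key y = 2 := by
      intro y hy; simpa using (List.of_mem_filter hy)
    rcases hx with hx | hx | hx
    · rw [List.append_assoc,
        pv_insertBy_middle key x _ _
          (by intro y hy; have := m0 y hy; omega)
          (by intro y hy; rcases List.mem_append.1 hy with h' | h'
              · have := m1 y h'; omega
              · have := m2 y h'; omega)]
      simp [List.filter_append, hx]
    · rw [pv_insertBy_middle key x _ _
          (by intro y hy; rcases List.mem_append.1 hy with h' | h'
              · have := m0 y h'; omega
              · have := m1 y h'; omega)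
          (by intro y hy; have := m2 y hy; omega)]
      simp [List.filter_append, hx]
    · rw [show ys.filter (fun z => key z == 0) ++ ys.filter (fun z => key z == 1) ++
            ys.filter (fun z => key z == 2) =
          (ys.filter (fun z => key z == 0) ++ ys.filter (fun z => key z == 1) ++
            ys.filter (fun z => key z == 2)) ++ [] by simp,
        pv_insertBy_middle key x _ _
          (by intro y hy
              simp only [List.append_assoc, List.mem_append] at hy
              rcases hy with h' | h' | h'
              · have := m0 y h'; omega
              · have := m1 y h'; omega
              · have := m2 y h'; omega)
          (by intro y hy; simp at hy)]
      simp [List.filter_append, hx]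

-- a Set's Bool membership test as a decide
theorem pv_contains_eq (s : PySem.Set Int) (x : Int) :
    PySem.Set.contains s x = decide (x ∈ s) := by
  by_cases hm : x ∈ s
  · simp [hm]
  · simp only [hm, decide_false]
    rcases Bool.eq_false_or_eq_true (PySem.Set.contains s x) with h | h
    · exact absurd ((PySem.Set.contains_iff s x).1 h) hm
    · exact h

-- A's dedup loop on a duplicate-free list: appends exactly the fresh nodes < n and
-- the final seen-set holds exactly the old seen plus the kept nodes.
theorem pv_loop1 (n : Int) (L : List Int) (hnd : L.Nodup) (S : PySem.Set Int) (D : List Int) :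
    (L.foldl
      (fun (sd : PySem.Set Int × List Int) node =>
        if node < n ∧ PySem.Set.contains sd.1 node = false then
          (PySem.Set.add sd.1 node, sd.2 ++ [node])
        else sd)
      (S, D)).2 =
      D ++ L.filter (fun x => decide (x < n) && !(PySem.Set.contains S x)) ∧
    ∀ y, (y ∈ (L.foldl
      (fun (sd : PySem.Set Int × List Int) node =>
        if node < n ∧ PySem.Set.contains sd.1 node = false then
          (PySem.Set.add sd.1 node, sd.2 ++ [node])
        else sd)
      (S, D)).1 ↔ y ∈ S ∨ (y ∈ L ∧ y < n)) := by
  induction L generalizing S D with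
  | nil => simp
  | cons x t ih =>
    have hx : x ∉ t := (List.nodup_cons.1 hnd).1
    have hndt : t.Nodup := (List.nodup_cons.1 hnd).2
    by_cases hc : x < n ∧ PySem.Set.contains S x = false
    · simp only [List.foldl_cons, if_pos hc]
      obtain ⟨ih1, ih2⟩ := ih hndt (PySem.Set.add S x) (D ++ [x])
      constructor
      · rw [ih1]
        have hfe : t.filter (fun z => decide (z < n) && !(PySem.Set.contains (PySem.Set.add S x) z)) =
            t.filter (fun z => decide (z < n) && !(PySem.Set.contains S z)) := by
          apply List.filter_congr
          intro z hz
          have hzx : z ≠ x := fun h => hx (h ▸ hz)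
          simp [PySem.Set.mem_add, hzx]
        have hpx : (decide (x < n) && !(PySem.Set.contains S x)) = true := by
          rw [hc.2]; simp [hc.1]
        rw [hfe, List.filter_cons, hpx]
        simp
      · intro y
        rw [ih2 y, PySem.Set.mem_add]
        by_cases hyx : y = x
        · subst hyx; simp [hc.1]
        · simp [hyx]
    · simp only [List.foldl_cons, if_neg hc]
      obtain ⟨ih1, ih2⟩ := ih hndt S D
      have hcS : x < n → x ∈ S := by
        intro hlt
        by_contra hm
        exact hc ⟨hlt, by rw [pv_contains_eq]; simp [hm]⟩
      constructor
      · rw [ih1]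
        have : (decide (x < n) && !(PySem.Set.contains S x)) = false := by
          rw [pv_contains_eq]
          by_cases hlt : x < n
          · simp [hlt, hcS hlt]
          · simp [hlt]
        rw [List.filter_cons, this]
        simp
      · intro y
        rw [ih2 y]
        by_cases hyx : y = x
        · subst hyx
          simp only [List.mem_cons]
          constructor
          · rintro (h | ⟨h, hl⟩)
            · exact Or.inl h
            · exact Or.inr ⟨Or.inr h, hl⟩
          · rintro (h | ⟨h | h, hl⟩)
            · exact Or.inl h
            · exact Or.inl (hcS hl)
            · exact Or.inr ⟨h, hl⟩
        · simp [hyx]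

-- membership in A's ones/zeros index lists
theorem pv_mem_idx (cs : List Char) (c : Char) (j : Int) :
    j ∈ ((PySem.List.enumerate cs).filter (fun p => p.2 == c)).map (·.1) ↔
      0 ≤ j ∧ PySem.List.pyGet? cs j = some c := by
  simp only [List.mem_map, List.mem_filter, PySem.List.mem_enumerate_iff]
  constructor
  · rintro ⟨⟨i, x⟩, ⟨⟨k, hk, hpe⟩, hcx⟩, rfl⟩
    have hi : i = (0 : Int) + k := congrArg Prod.fst hpe
    have hxv : x = cs[k] := congrArg Prod.snd hpe
    subst hi
    refine ⟨by positivity, ?_⟩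
    rw [show ((0:Int) + k) = (k:Int) by ring, PySem.List.pyGet?_natCast,
      List.getElem?_eq_getElem hk]
    simp only [beq_iff_eq] at hcx
    rw [← hxv, hcx]
  · rintro ⟨hj, hget⟩
    lift j to ℕ using hj with k
    rw [PySem.List.pyGet?_natCast] at hget
    have hk : k < cs.length := by
      by_contra h
      rw [List.getElem?_eq_none (by omega)] at hget
      simp at hget
    rw [List.getElem?_eq_getElem hk] at hget
    exact ⟨((0:Int) + (k:Int), cs[k]), ⟨⟨k, hk, rfl⟩, by simpa using (Option.some.inj hget)⟩,
      by simp⟩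

theorem pv_pairwise_idx (cs : List Char) (c : Char) :
    (((PySem.List.enumerate cs).filter (fun p => p.2 == c)).map (·.1)).Pairwise (· < ·) :=
  List.pairwise_map.2 ((PySem.List.pairwise_lt_enumerate cs 0).sublist List.filter_sublist)

-- Two strictly increasing Int lists with the same members are equal.
theorem pv_eq_of_mem_iff (l₁ l₂ : List Int) (h₁ : l₁.Pairwise (· < ·)) (h₂ : l₂.Pairwise (· < ·))
    (hm : ∀ x, x ∈ l₁ ↔ x ∈ l₂) : l₁ = l₂ := by
  have nd₁ : l₁.Nodup := h₁.nodup
  have nd₂ : l₂.Nodup := h₂.nodup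
  exact ((List.perm_ext_iff_of_nodup nd₁ nd₂).2 hm).eq_of_pairwise
    (fun a b _ _ h h' => by omega) h₁ h₂

-- the priority classified by membership in ones/zeros, for nonnegative i
theorem pv_priority_cases (cs : List Char) (i : Int) (hi : 0 ≤ i) :
    (pvPriority cs i = 0 ↔ i ∈ ((PySem.List.enumerate cs).filter (fun p => p.2 == '1')).map (·.1)) ∧
    (pvPriority cs i = 1 ↔ i ∈ ((PySem.List.enumerate cs).filter (fun p => p.2 == '0')).map (·.1)) := by
  rw [pv_mem_idx, pv_mem_idx]
  unfold pvPriority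
  by_cases hlt : i < (cs.length : Int)
  · rw [if_pos hlt]
    by_cases h1 : PySem.List.pyGet? cs i = some '1'
    · simp [h1, hi]
    · rw [if_neg h1]
      by_cases h0 : PySem.List.pyGet? cs i = some '0'
      · simp [h0, hi]
      · simp [h0, h1, hi]
  · rw [if_neg hlt]
    have hnone : PySem.List.pyGet? cs i = none := by
      lift i to ℕ using hi with k
      rw [PySem.List.pyGet?_natCast]
      exact List.getElem?_eq_none (by exact_mod_cast le_of_not_gt hlt)
    simp [hnone]

theorem pv_priority_range (cs : List Char) (i : Int) :
    pvPriority cs i = 0 ∨ pvPriority cs i = 1 ∨ pvPriority cs i = 2 := by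
  unfold pvPriority
  split_ifs <;> simp

-- ones and zeros are disjoint and each duplicate-free
theorem pv_onzeros_nodup (cs : List Char) :
    ((((PySem.List.enumerate cs).filter (fun p => p.2 == '1')).map (·.1)) ++
      (((PySem.List.enumerate cs).filter (fun p => p.2 == '0')).map (·.1))).Nodup := by
  rw [List.nodup_append]
  refine ⟨(pv_pairwise_idx cs '1').nodup, (pv_pairwise_idx cs '0').nodup, ?_⟩
  intro a ha b hb heq
  subst heq
  have h1 := (pv_mem_idx cs '1' a).1 ha
  have h0 := (pv_mem_idx cs '0' a).1 hb
  rw [h1.2] at h0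
  exact absurd (Option.some.inj h0.2) (by decide)

theorem pv_main (bitstring : String) (n : Int) :
    bitstring_to_route bitstring n = bitstring_to_route_alt bitstring n := by
  unfold bitstring_to_route bitstring_to_route_alt
  set cs := bitstring.toList.reverse with hcs
  set ones := ((PySem.List.enumerate cs).filter (fun p => p.2 == '1')).map (·.1) with hones
  set zeros := ((PySem.List.enumerate cs).filter (fun p => p.2 == '0')).map (·.1) with hzeros
  obtain ⟨h1, h2⟩ := pv_loop1 n (ones ++ zeros) (pv_onzeros_nodup cs) PySem.Set.empty []
  set sd := ((ones ++ zeros).foldl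
      (fun (sd : PySem.Set Int × List Int) node =>
        if node < n ∧ PySem.Set.contains sd.1 node = false then
          (PySem.Set.add sd.1 node, sd.2 ++ [node])
        else sd)
      (PySem.Set.empty, [])) with hsd
  rw [PySem.List.foldl_append_ite_eq_filter, h1,
    pv_sorted3 (pvPriority cs) _ (fun x _ => pv_priority_range cs x)]
  have hempty : ∀ x : Int, PySem.Set.contains PySem.Set.empty x = false := by
    intro x; rfl
  have hfsplit : (ones ++ zeros).filter
      (fun x => decide (x < n) && !(PySem.Set.contains PySem.Set.empty x)) =
      ones.filter (fun x => decide (x < n)) ++ zeros.filter (fun x => decide (x < n)) := by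
    rw [List.filter_append]
    congr 1 <;> · apply List.filter_congr; intro z hz; rw [hempty z]; simp
  rw [hfsplit]
  have e0 : ones.filter (fun x => decide (x < n)) =
      (PySem.List.pyRange 0 n 1).filter (fun i => pvPriority cs i == 0) := by
    apply pv_eq_of_mem_iff
    · exact (pv_pairwise_idx cs '1').sublist List.filter_sublist
    · exact (PySem.List.pairwise_lt_pyRange_one 0 n).sublist List.filter_sublist
    · intro x
      simp only [List.mem_filter, decide_eq_true_eq, PySem.List.mem_pyRange_one, beq_iff_eq]
      constructor
      · rintro ⟨hm, hlt⟩
        have h0 : (0:Int) ≤ x := ((pv_mem_idx cs '1' x).1 hm).1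
        exact ⟨⟨h0, hlt⟩, (pv_priority_cases cs x h0).1.2 hm⟩
      · rintro ⟨⟨h0, hlt⟩, hp⟩
        exact ⟨(pv_priority_cases cs x h0).1.1 hp, hlt⟩
  have e1 : zeros.filter (fun x => decide (x < n)) =
      (PySem.List.pyRange 0 n 1).filter (fun i => pvPriority cs i == 1) := by
    apply pv_eq_of_mem_iff
    · exact (pv_pairwise_idx cs '0').sublist List.filter_sublist
    · exact (PySem.List.pairwise_lt_pyRange_one 0 n).sublist List.filter_sublist
    · intro x
      simp only [List.mem_filter, decide_eq_true_eq, PySem.List.mem_pyRange_one, beq_iff_eq]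
      constructor
      · rintro ⟨hm, hlt⟩
        have h0 : (0:Int) ≤ x := ((pv_mem_idx cs '0' x).1 hm).1
        exact ⟨⟨h0, hlt⟩, (pv_priority_cases cs x h0).2.2 hm⟩
      · rintro ⟨⟨h0, hlt⟩, hp⟩
        exact ⟨(pv_priority_cases cs x h0).2.1 hp, hlt⟩
  have e2 : (PySem.List.pyRange 0 n 1).filter
      (fun x => decide (PySem.Set.contains sd.1 x = false)) =
      (PySem.List.pyRange 0 n 1).filter (fun i => pvPriority cs i == 2) := by
    apply List.filter_congr
    intro x hx
    obtain ⟨h0, hlt⟩ := PySem.List.mem_pyRange_one.1 hx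
    have hmem : x ∈ sd.1 ↔ x ∈ ones ∨ x ∈ zeros := by
      rw [h2 x]
      constructor
      · rintro (h | ⟨h, _⟩)
        · exact absurd ((PySem.Set.contains_iff _ _).2 h) (by rw [hempty x]; simp)
        · exact List.mem_append.1 h
      · intro h
        exact Or.inr ⟨List.mem_append.2 h, hlt⟩
    have hiff : (PySem.Set.contains sd.1 x = false) ↔ pvPriority cs x = 2 := by
      constructor
      · intro hcf
        rcases pv_priority_range cs x with hp | hp | hp
        · exfalso
          have := (pv_priority_cases cs x h0).1.1 hp
          rw [(PySem.Set.contains_iff _ _).2 (hmem.2 (Or.inl this))] at hcf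
          exact Bool.noConfusion hcf
        · exfalso
          have := (pv_priority_cases cs x h0).2.1 hp
          rw [(PySem.Set.contains_iff _ _).2 (hmem.2 (Or.inr this))] at hcf
          exact Bool.noConfusion hcf
        · exact hp
      · intro hp
        rcases Bool.eq_false_or_eq_true (PySem.Set.contains sd.1 x) with h' | h'
        · exfalso
          rcases hmem.1 ((PySem.Set.contains_iff _ _).1 h') with h'' | h''
          · have := (pv_priority_cases cs x h0).1.2 h''; omega
          · have := (pv_priority_cases cs x h0).2.2 h''; omega
        · exact h'
    show decide (PySem.Set.contains sd.1 x = false) = (pvPriority cs x == 2)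
    cases hcb : PySem.Set.contains sd.1 x with
    | false => simp [hiff.1 hcb]
    | true =>
        have hp : pvPriority cs x ≠ 2 := by
          intro h
          have := hiff.2 h
          rw [hcb] at this
          exact Bool.noConfusion this
        simp [hp]
  rw [e0, e1, e2]
  simp

-- ===== VERDICT (by name: the statement is the Claim_ definition above) =====
theorem bitstring_to_route_spec : Claim_equal_bitstring_to_route := by
  intro bitstring n _
  unfold Spec_bitstring_to_route
  exact pv_main bitstring n
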